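-- pv_equiv track=rewrite | github.com/KacperSatora/UEK-pp1 | 13-Test3/p1.py | f
-- ===== SOURCE A (Python) =====
-- def f(n):
--     returnString = ""
--     if n > 0:
--         for i in range(n):
--             if i % 5 == 0:
--                 returnString += "-"
--                 returnString += "/"
--             else:
--                 returnString += "/"
--     return returnString[1:]
-- ===== SOURCE B (Python) =====
-- def f(n):
--     return "-".join("/" * min(5, n - start) for start in range(0, n, 5))
-- ===== Notes on version B (the rewrite author's own statement) =====
-- stated objective: simpler
-- what changed: Replaces the per-index loop with its modulo branch and the leading-character strip by a one-liner: dash-join of slash runs of up to five characters, one per chunk start stepping through the range.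
import Mathlib
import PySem

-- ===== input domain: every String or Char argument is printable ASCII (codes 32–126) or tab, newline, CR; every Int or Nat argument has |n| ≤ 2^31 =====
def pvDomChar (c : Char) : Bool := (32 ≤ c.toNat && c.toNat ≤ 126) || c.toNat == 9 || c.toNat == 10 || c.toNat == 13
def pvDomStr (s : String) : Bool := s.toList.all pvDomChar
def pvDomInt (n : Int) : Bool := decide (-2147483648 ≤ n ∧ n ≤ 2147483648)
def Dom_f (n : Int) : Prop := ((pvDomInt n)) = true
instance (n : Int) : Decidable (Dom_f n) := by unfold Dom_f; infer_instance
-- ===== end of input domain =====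

-- B builds the same string as dash-joined runs of up to five slashes (one chunk per
-- start in range(0, n, 5)) instead of A's per-index loop with an i%5 branch and a
-- final leading-character strip; objective: simpler.

-- ===== PORT A =====
def f (n : Int) : String :=
  -- returnString starts as ""; the for-loop over range(n) runs only when n > 0
  String.ofList (PySem.List.slice
    (if n > 0 then
      (PySem.List.pyRange 0 n 1).foldl
        (fun s i => if PySem.Int.mod i 5 == 0 then (s ++ ['-']) ++ ['/'] else s ++ ['/'])
        []
    else [])
    (some 1) none)

-- ===== PORT B =====
def f_alt (n : Int) : String :=
  String.ofList (PySem.Chars.join ['-']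
    ((PySem.List.pyRange 0 n 5).map (fun start => PySem.List.pyRepeat ['/'] (min 5 (n - start)))))

-- ===== PRECONDITION & SPEC =====
def Spec_f (n : Int) (out : String) : Prop := out = f_alt n
instance (n : Int) (out : String) : Decidable (Spec_f n out) := by unfold Spec_f; infer_instance

-- ===== CLAIM (what is proved, stated in full; the proofs are below) =====
def Claim_equal_f : Prop := ∀ (n : Int), Dom_f n → Spec_f n (f n)

-- ===== LEMMAS AND PROOFS =====

-- state of A's loop after m iterations
def loopA : Nat → List Char
  | 0 => []
  | m+1 => loopA m ++ (if m % 5 == 0 then ['-', '/'] else ['/'])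

-- B's chunk for chunk index q when n = m
def chunkOf (m q : Nat) : List Char := List.replicate (min 5 (m - 5*q)) '/'

-- B's result (before String.ofList) as a function of m = n.toNat
def joinB (m : Nat) : List Char :=
  PySem.Chars.join ['-'] ((List.range ((m+4)/5)).map (chunkOf m))

theorem join_append_singleton (sep y : List Char) (l : List (List Char)) (h : l ≠ []) :
    PySem.Chars.join sep (l ++ [y]) = PySem.Chars.join sep l ++ sep ++ y := by
  induction l with
  | nil => exact absurd rfl h
  | cons a l ih =>
    cases l with
    | nil =>
      simp [PySem.Chars.join_cons_cons, PySem.Chars.join_singleton]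
    | cons b l' =>
      have := ih (by simp)
      simp only [List.cons_append] at this ⊢
      rw [PySem.Chars.join_cons_cons, PySem.Chars.join_cons_cons, this]
      simp [List.append_assoc]

theorem loopA_succ_eq (m : Nat) : loopA (m+1) = '-' :: joinB (m+1) := by
  induction m with
  | zero => decide
  | succ m ih =>
    have key : joinB (m+2) = joinB (m+1) ++ (if (m+1) % 5 == 0 then ['-', '/'] else ['/']) := by
      by_cases h5 : (m+1) % 5 = 0
      · -- a new chunk starts: one more chunk, previous chunks unchanged
        obtain ⟨q, hq⟩ : ∃ q, m + 1 = 5 * q := ⟨(m+1)/5, by omega⟩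
        have hq1 : 1 ≤ q := by omega
        have hcnt1 : (m+1+4)/5 = q := by omega
        have hcnt2 : (m+2+4)/5 = q + 1 := by omega
        have hcongr : (List.range q).map (chunkOf (m+2)) = (List.range q).map (chunkOf (m+1)) := by
          apply List.map_congr_left
          intro k hk
          have hk' : k < q := List.mem_range.mp hk
          unfold chunkOf
          congr 1
          omega
        have hlast : chunkOf (m+2) q = ['/'] := by
          unfold chunkOf
          have : min 5 (m + 2 - 5*q) = 1 := by omega
          rw [this]; rfl
        have hne : (List.range q).map (chunkOf (m+1)) ≠ [] := by
          simp [List.map_eq_nil_iff, List.range_eq_nil]; omega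
        unfold joinB
        rw [hcnt1, hcnt2, List.range_succ, List.map_append, hcongr, List.map_singleton, hlast,
          join_append_singleton _ _ _ hne]
        simp [h5]
      · -- same number of chunks; the last chunk gains one slash
        have hq1 : 1 ≤ (m+1+4)/5 := by omega
        obtain ⟨q, hq⟩ : ∃ q, (m+1+4)/5 = q + 1 := ⟨(m+1+4)/5 - 1, by omega⟩
        have hcnt2 : (m+2+4)/5 = q + 1 := by omega
        have hr : 1 ≤ m + 1 - 5*q ∧ m + 1 - 5*q ≤ 4 := by omega
        have hcongr : (List.range q).map (chunkOf (m+2)) = (List.range q).map (chunkOf (m+1)) := by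
          apply List.map_congr_left
          intro k hk
          have hk' : k < q := List.mem_range.mp hk
          unfold chunkOf
          congr 1
          omega
        have hlast : chunkOf (m+2) q = chunkOf (m+1) q ++ ['/'] := by
          unfold chunkOf
          have h1 : min 5 (m + 2 - 5*q) = (m + 1 - 5*q) + 1 := by omega
          have h2 : min 5 (m + 1 - 5*q) = m + 1 - 5*q := by omega
          rw [h1, h2, List.replicate_succ']
        unfold joinB
        rw [hq, hcnt2, List.range_succ]
        simp only [List.map_append, List.map_singleton]
        rw [hcongr, hlast]
        rcases Nat.eq_zero_or_pos q with hq0 | hq0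
        · subst hq0
          simp [PySem.Chars.join_singleton, h5]
        · have hne : (List.range q).map (chunkOf (m+1)) ≠ [] := by
            simp [List.map_eq_nil_iff, List.range_eq_nil]; omega
          rw [join_append_singleton _ _ _ hne, join_append_singleton _ _ _ hne]
          simp [h5, List.append_assoc]
    rw [show m + 1 + 1 = (m+1) + 1 from rfl]
    unfold loopA
    rw [ih, key]
    simp

theorem foldA (m : Nat) :
    (PySem.List.pyRange 0 (m : Int) 1).foldl
      (fun s i => if PySem.Int.mod i 5 == 0 then (s ++ ['-']) ++ ['/'] else s ++ ['/'])
      [] = loopA m := by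
  induction m with
  | zero => rfl
  | succ m ih =>
    have hcast : ((m + 1 : Nat) : Int) = (m : Int) + 1 := by push_cast; ring
    rw [hcast, PySem.List.pyRange_one_succ_right (by positivity), List.foldl_append, ih]
    have hmod : PySem.Int.mod (m : Int) 5 = ((m % 5 : Nat) : Int) := by
      exact_mod_cast PySem.Int.mod_natCast m 5
    simp only [List.foldl_cons, List.foldl_nil, hmod, loopA]
    by_cases h : m % 5 = 0
    · simp [h]
    · have h2 : ¬ ((m % 5) == 0) = true := by
        simp [beq_iff_eq]; omega
      have h3 : ¬ (5:Int) ∣ (m : Int) := by omega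
      simp [h2, h3]

theorem f_eq_of_pos (m : Nat) (hm : 0 < m) :
    f (m : Int) = String.ofList (joinB m) := by
  unfold f
  have hpos : ((m : Int) > 0) := by exact_mod_cast hm
  rw [if_pos hpos, foldA, PySem.List.slice_from_one]
  obtain ⟨k, rfl⟩ := Nat.exists_eq_succ_of_ne_zero (Nat.pos_iff_ne_zero.mp hm)
  rw [loopA_succ_eq]
  rfl

theorem f_alt_eq_of_pos (m : Nat) (hm : 0 < m) :
    f_alt (m : Int) = String.ofList (joinB m) := by
  unfold f_alt
  have hpos : (0 : Int) < (m : Int) := by exact_mod_cast hm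
  rw [PySem.List.pyRange_of_pos 0 (m : Int) (by norm_num), if_pos hpos]
  congr 1
  unfold joinB
  congr 1
  have hcnt : (((m : Int) - 0 + 5 - 1) / 5).toNat = (m + 4) / 5 := by omega
  rw [hcnt, List.map_map]
  apply List.map_congr_left
  intro k hk
  have hk' : k < (m + 4) / 5 := List.mem_range.mp hk
  simp only [Function.comp]
  rw [PySem.List.pyRepeat_singleton]
  unfold chunkOf
  congr 1
  omega

-- ===== VERDICT (by name: the statement is the Claim_ definition above) =====
theorem f_spec : Claim_equal_f := by
  intro n _
  unfold Spec_f
  rcases (by omega : n ≤ 0 ∨ 0 < n) with hn | hn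
  · have hA : f n = String.ofList [] := by
      unfold f
      rw [if_neg (show ¬ n > 0 by omega), PySem.List.slice_from_one]
      rfl
    have hB : f_alt n = String.ofList [] := by
      unfold f_alt
      rw [PySem.List.pyRange_of_pos 0 n (by norm_num), if_neg (show ¬ 0 < n by omega)]
      rfl
    rw [hA, hB]
  · have hm : n = ((n.toNat : Nat) : Int) := by omega
    rw [hm, f_eq_of_pos n.toNat (by omega), f_alt_eq_of_pos n.toNat (by omega)]
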